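-- pv_equiv track=rewrite | github.com/aybu/google-kickstart | 2021_round_h/1-transform-the-string.py | transform
-- ===== SOURCE A (Python) =====
-- def transform(s, f):
--     time = 0
--     num_letters = 26
--
--     for char1 in s:
--         min_dist = num_letters
--         for char2 in f:
--             diff = ord(char1) - ord(char2)
--             min_dist = min(min_dist, min(-diff % num_letters, diff % num_letters))
--         time += min_dist
--
--     return time
-- ===== SOURCE B (Python) =====
-- def transform(s, f):
--     def dist(r):
--         best = 26
--         for c in f:
--             d = (r - ord(c)) % 26
--             best = min(best, d, -d % 26)
--         return best
--     table = [dist(r) for r in range(26)]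
--     return sum(table[ord(c) % 26] for c in s)
-- ===== Notes on version B (the rewrite author's own statement) =====
-- stated objective: faster
-- what changed: Instead of scanning all of f for every character of s, B precomputes a 26-entry table of minimal circular distances from each residue class to f, then answers each character of s with one table lookup.
import Mathlib
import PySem

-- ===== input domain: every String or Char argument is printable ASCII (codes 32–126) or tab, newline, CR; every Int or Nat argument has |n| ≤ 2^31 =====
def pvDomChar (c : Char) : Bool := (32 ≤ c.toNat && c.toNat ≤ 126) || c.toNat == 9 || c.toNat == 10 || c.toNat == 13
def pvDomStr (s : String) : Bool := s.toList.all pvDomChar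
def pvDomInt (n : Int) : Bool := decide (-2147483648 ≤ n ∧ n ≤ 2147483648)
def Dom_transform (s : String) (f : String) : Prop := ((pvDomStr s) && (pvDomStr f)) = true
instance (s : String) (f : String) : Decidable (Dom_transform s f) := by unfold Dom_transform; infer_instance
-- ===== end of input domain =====

-- B replaces A's inner scan of f per character of s by a precomputed 26-entry
-- minimal-distance table and one lookup per character (objective: faster, asymptotic).

-- ===== PORT A =====
def transform (s : String) (f : String) : Int :=
  s.toList.foldl (fun time c1 =>
    time + f.toList.foldl (fun md c2 =>
      let diff : Int := (c1.toNat : Int) - (c2.toNat : Int)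
      min md (min (PySem.Int.mod (-diff) 26) (PySem.Int.mod diff 26))) 26) 0

-- ===== PORT B =====
-- helper dist(r): minimal circular distance from residue r to the letters of f
def pvDist (f : String) (r : Int) : Int :=
  f.toList.foldl (fun best c =>
    let d := PySem.Int.mod (r - (c.toNat : Int)) 26
    min best (min d (PySem.Int.mod (-d) 26))) 26

def transform_alt (s : String) (f : String) : Int :=
  let table := (PySem.List.pyRange 0 26 1).map (pvDist f)
  s.toList.foldl (fun t c =>
    t + PySem.List.pyGetD table (PySem.Int.mod ((c.toNat : Int)) 26) 0) 0

-- ===== PRECONDITION & SPEC =====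
def Spec_transform (s : String) (f : String) (out : Int) : Prop := out = transform_alt s f
instance (s : String) (f : String) (out : Int) : Decidable (Spec_transform s f out) := by unfold Spec_transform; infer_instance

-- ===== CLAIM (what is proved, stated in full; the proofs are below) =====
def Claim_equal_transform : Prop := ∀ (s : String) (f : String), Dom_transform s f → Spec_transform s f (transform s f)

-- ===== LEMMAS AND PROOFS =====

-- a % 26 taken again modulo 26 after a subtraction: congruence of emod
theorem pv_sub_emod_left (a b : Int) : (a % 26 - b) % 26 = (a - b) % 26 := by
  conv_rhs => rw [Int.sub_emod]
  rw [Int.sub_emod, Int.emod_emod_of_dvd a dvd_rfl]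

theorem pv_neg_emod (x : Int) : (-(x % 26)) % 26 = (-x) % 26 := by
  rw [← zero_sub, ← zero_sub x, Int.sub_emod, Int.emod_emod_of_dvd x dvd_rfl, ← Int.sub_emod]

-- the table entry at residue (ord c1) % 26 equals A's inner minimum over f
theorem pvDist_eq_inner (f : String) (c1 : Char) :
    pvDist f (PySem.Int.mod ((c1.toNat : Int)) 26)
      = f.toList.foldl (fun md c2 =>
          let diff : Int := (c1.toNat : Int) - (c2.toNat : Int)
          min md (min (PySem.Int.mod (-diff) 26) (PySem.Int.mod diff 26))) 26 := by
  unfold pvDist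
  refine PySem.List.foldl_congr_mem _ _ _ _ (fun best c2 _ => ?_)
  simp only [PySem.Int.mod_eq_emod_of_pos (a := (c1.toNat : Int)) (by norm_num : (0:Int) < 26)]
  simp only [PySem.Int.mod_eq_emod_of_pos (by norm_num : (0:Int) < 26)]
  rw [pv_sub_emod_left, pv_neg_emod, Int.neg_sub]
  rw [min_comm ((((c1.toNat : Int) - (c2.toNat : Int)) % 26)) _]

-- ===== VERDICT (by name: the statement is the Claim_ definition above) =====
theorem transform_spec : Claim_equal_transform := by
  intro s f _
  unfold Spec_transform transform transform_alt
  refine (PySem.List.foldl_congr_mem _ _ _ _ (fun t c1 _ => ?_)).symm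
  have hi : (0:Int) ≤ PySem.Int.mod ((c1.toNat : Int)) 26 := by
    rw [PySem.Int.mod_eq_emod_of_pos (by norm_num : (0:Int) < 26)]
    exact Int.emod_nonneg _ (by norm_num)
  have hlt : PySem.Int.mod ((c1.toNat : Int)) 26 < 26 := by
    rw [PySem.Int.mod_eq_emod_of_pos (by norm_num : (0:Int) < 26)]
    exact Int.emod_lt_of_pos _ (by norm_num)
  rw [PySem.List.pyGetD_map_pyRange_of_nonneg (pvDist f) 26 _ 0 hi hlt, pvDist_eq_inner]
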